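-- pv_equiv track=rewrite | github.com/pgedelman/Block-Smash | smash-bot/training/train_model_helper.py | smash_example_grid
-- ===== SOURCE A (Python) =====
-- def smash_example_grid(grid, structure, row, col):
--     example_grid = [row[:] for row in grid]
--     for s in structure:
--         example_grid[row + s[1]][col + s[0]] = 1
--     score = 0
--     getting_smashed = []
--     groups_smashed = 0
--     for i in range(len(example_grid)):
--         full_row_smashed = all(tile == 1 for tile in example_grid[i])
--         if full_row_smashed:
--             groups_smashed += 1
--             for j in range(len(example_grid[i])):
--                 getting_smashed.append((i, j))
--     for j in range(len(example_grid[0])):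
--         full_col_smashed = all(example_grid[i][j] == 1 for i in range(len(example_grid)))
--         if full_col_smashed:
--             groups_smashed += 1
--             for i in range(len(example_grid)):
--                 getting_smashed.append((i, j))
--     for (r, c) in getting_smashed:
--         example_grid[r][c] = 0
--     if getting_smashed:
--         score += 10 * (groups_smashed ** 2) - 10 * groups_smashed + 15
--     return example_grid, score
-- ===== SOURCE B (Python) =====
-- def smash_example_grid(grid, structure, row, col):
--     g = [r[:] for r in grid]
--     for s in structure:
--         g[row + s[1]][col + s[0]] = 1
--     w = len(g[0])
--     n = len(g)
--     # single row-major pass: per-column 1-counters replace any explicit column scan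
--     counts = [0] * w
--     row_full = []
--     for r in g:
--         full = True
--         for j, t in enumerate(r):
--             if t == 1:
--                 counts[j] += 1
--             else:
--                 full = False
--         row_full.append(full)
--     col_full = [c == n for c in counts]
--     groups = sum(row_full) + sum(col_full)
--     out = [([0] * w) if rf
--            else [0 if cf else t for cf, t in zip(col_full, r)]
--            for rf, r in zip(row_full, g)]
--     score = 10 * groups * groups - 10 * groups + 15 if groups else 0
--     return out, score
-- ===== Notes on version B (the rewrite author's own statement) =====
-- stated objective: alternative
-- what changed: B detects full columns with per-column 1-counters accumulated in a single row-major pass (no column scan and no coordinate list at all), then rebuilds the cleared grid functionally from the row-full/column-full flags and scores from their counts.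
-- outside the precondition, e.g. on smash_example_grid([[], []], [], 0, 0): A returns ([[], []], 0), B returns ([[], []], 35); on smash_example_grid([[1, 1], [1, 1, 1]], [], 0, 0): A returns ([[0, 0], [0, 0, 0]], 135), B raises IndexError
import Mathlib
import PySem

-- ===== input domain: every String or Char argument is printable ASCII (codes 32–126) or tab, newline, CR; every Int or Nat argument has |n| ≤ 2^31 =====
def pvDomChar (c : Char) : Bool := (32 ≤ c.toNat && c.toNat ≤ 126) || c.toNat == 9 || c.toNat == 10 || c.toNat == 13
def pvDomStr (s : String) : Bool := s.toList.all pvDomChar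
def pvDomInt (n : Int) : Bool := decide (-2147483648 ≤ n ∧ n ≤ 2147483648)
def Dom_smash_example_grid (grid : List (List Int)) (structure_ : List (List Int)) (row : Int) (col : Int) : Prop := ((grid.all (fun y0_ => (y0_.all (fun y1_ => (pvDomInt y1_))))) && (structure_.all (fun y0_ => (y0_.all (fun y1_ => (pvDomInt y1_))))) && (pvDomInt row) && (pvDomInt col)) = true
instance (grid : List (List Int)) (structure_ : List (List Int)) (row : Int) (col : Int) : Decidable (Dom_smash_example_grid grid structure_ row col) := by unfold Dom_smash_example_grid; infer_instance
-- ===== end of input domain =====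

-- B replaces A's column scan and coordinate list by per-column 1-counters accumulated in a
-- single row-major pass, then rebuilds the cleared grid from the row/column flags
-- (objective: alternative decomposition, same cost).

-- ===== PORT A =====
-- Python's negative-index resolution for `g[i]` (Pre_ guarantees -len ≤ i < len).
def pyResolve (n : Nat) (i : Int) : Nat := if i < 0 then (i + n).toNat else i.toNat

-- `g[i][j] = v` (in-range inside Pre_; List.set is a no-op out of range).
def setCell (g : List (List Int)) (i j : Nat) (v : Int) : List (List Int) :=
  g.set i ((g.getD i []).set j v)

-- `example_grid = [row[:] for row in grid]; for s in structure: example_grid[row+s[1]][col+s[0]] = 1`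
-- (this line is identical in A and B, so the helper is shared by both ports)
def placeGrid (grid : List (List Int)) (structure_ : List (List Int)) (row col : Int) : List (List Int) :=
  structure_.foldl (fun g s =>
    let r := pyResolve g.length (row + s.getD 1 0)
    setCell g r (pyResolve (g.getD r []).length (col + s.getD 0 0)) 1) grid

def smash_example_grid (grid : List (List Int)) (structure_ : List (List Int)) (row : Int) (col : Int) : List (List Int) × Int :=
  let g := placeGrid grid structure_ row col
  -- row scan: append every cell of a full row to getting_smashed, count groups
  let st1 : List (Nat × Nat) × Int := (List.range g.length).foldl (fun st i =>
      if (g.getD i []).all (fun t => t == 1) then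
        (st.1 ++ (List.range (g.getD i []).length).map (fun j => (i, j)), st.2 + 1)
      else st) ([], 0)
  -- column scan (on the placed, not-yet-cleared grid)
  let st2 : List (Nat × Nat) × Int := (List.range (g.getD 0 []).length).foldl (fun st j =>
      if (List.range g.length).all (fun i => (g.getD i []).getD j 0 == 1) then
        (st.1 ++ (List.range g.length).map (fun i => (i, j)), st.2 + 1)
      else st) st1
  -- clear the collected cells, then score
  let g2 := st2.1.foldl (fun h p => setCell h p.1 p.2 0) g
  (g2, if st2.1 ≠ [] then 10 * st2.2 ^ 2 - 10 * st2.2 + 15 else 0)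

-- ===== PORT B =====
-- `full = True; for j, t in enumerate(r): if t == 1: counts[j] += 1 else: full = False`
def innerB (counts : List Int) (r : List Int) : Bool × List Int :=
  (PySem.List.enumerate r 0).foldl
    (fun st jt =>
      if jt.2 == 1 then (st.1, st.2.set jt.1.toNat (st.2.getD jt.1.toNat 0 + 1))
      else (false, st.2)) (true, counts)

-- one outer-loop iteration: run the row, record its flag, keep the counters
def stepB (st : List Bool × List Int) (r : List Int) : List Bool × List Int :=
  let p := innerB st.2 r
  (st.1 ++ [p.1], p.2)

def smash_example_grid_alt (grid : List (List Int)) (structure_ : List (List Int)) (row : Int) (col : Int) : List (List Int) × Int :=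
  let g := placeGrid grid structure_ row col
  let w := (g.getD 0 []).length
  let n := g.length
  -- single row-major pass: per-column 1-counters + row-fullness flags
  let st := g.foldl stepB ([], List.replicate w 0)
  let row_full := st.1
  let col_full := st.2.map (fun c => c == (n : Int))
  let groups : Int := (row_full.countP id : Nat) + (col_full.countP id : Nat)
  let out := (row_full.zip g).map (fun p =>
      if p.1 then List.replicate w 0
      else (col_full.zip p.2).map (fun q => if q.1 then 0 else q.2))
  (out, if groups ≠ 0 then 10 * groups * groups - 10 * groups + 15 else 0)

-- ===== PRECONDITION & SPEC =====
-- Pre_ excludes inputs where A raises (empty grid, structure entries shorter than 2, placement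
-- index outside Python range), ragged grids (on which B raises) and grids whose rows are empty
-- (there A counts groups but clears nothing and scores 0 — an accident of its coordinate list).
def Pre_smash_example_grid (grid : List (List Int)) (structure_ : List (List Int)) (row : Int) (col : Int) : Prop :=
  grid ≠ [] ∧
  (∀ r ∈ grid, r.length = (grid.headD []).length) ∧
  (grid.headD []).length ≠ 0 ∧
  ∀ s ∈ structure_, 2 ≤ s.length ∧
    -(grid.length : Int) ≤ row + s.getD 1 0 ∧ row + s.getD 1 0 < (grid.length : Int) ∧
    -((grid.headD []).length : Int) ≤ col + s.getD 0 0 ∧ col + s.getD 0 0 < ((grid.headD []).length : Int)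
instance (grid : List (List Int)) (structure_ : List (List Int)) (row : Int) (col : Int) : Decidable (Pre_smash_example_grid grid structure_ row col) := by unfold Pre_smash_example_grid; infer_instance

def pvWitness_smash_example_grid : List (List Int) × List (List Int) × Int × Int :=
  ([[1, 0], [0, 1]], [[0, 0]], 1, 0)

def Spec_smash_example_grid (grid : List (List Int)) (structure_ : List (List Int)) (row : Int) (col : Int) (out : List (List Int) × Int) : Prop := out = smash_example_grid_alt grid structure_ row col
instance (grid : List (List Int)) (structure_ : List (List Int)) (row : Int) (col : Int) (out : List (List Int) × Int) : Decidable (Spec_smash_example_grid grid structure_ row col out) := by unfold Spec_smash_example_grid; infer_instance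

-- ===== CLAIM (what is proved, stated in full; the proofs are below) =====
def Claim_equal_smash_example_grid : Prop := ∀ (grid : List (List Int)) (structure_ : List (List Int)) (row : Int) (col : Int), Dom_smash_example_grid grid structure_ row col → Pre_smash_example_grid grid structure_ row col → Spec_smash_example_grid grid structure_ row col (smash_example_grid grid structure_ row col)

-- ===== LEMMAS AND PROOFS =====

-- getD-level facts about List.set
lemma getD_set_ne {α : Type} (l : List α) (i j : Nat) (v d : α) (h : i ≠ j) :
    (l.set i v).getD j d = l.getD j d := by
  simp [List.getD, List.getElem?_set_ne h]

lemma getD_zero_eq_headD {α : Type} (l : List α) (d : α) : l.getD 0 d = l.headD d := by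
  cases l <;> simp [List.getD]

lemma setCell_length (g : List (List Int)) (a b : Nat) (v : Int) :
    (setCell g a b v).length = g.length := by
  simp [setCell]

lemma setCell_rowlen (g : List (List Int)) (a b : Nat) (v : Int) (i : Nat) :
    ((setCell g a b v).getD i []).length = ((g.getD i []).length) := by
  unfold setCell
  by_cases hia : i = a
  · subst hia
    by_cases hlt : i < g.length
    · rw [List.getD_eq_getElem _ _ (by simpa using hlt), List.getElem_set_self (by simpa using hlt)]
      simp
    · rw [List.set_eq_of_length_le (by omega)]
  · rw [getD_set_ne _ _ _ _ _ (fun h => hia h.symm)]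

lemma getD_set_self {α : Type} (l : List α) (i : Nat) (v d : α) (h : i < l.length) :
    (l.set i v).getD i d = v := by
  simp [List.getD, h]

lemma getD_of_length_le {α : Type} (l : List α) (i : Nat) (d : α) (h : l.length ≤ i) :
    l.getD i d = d := by
  simp [List.getD, List.getElem?_eq_none h]

lemma setCell_cell (g : List (List Int)) (a b i j : Nat) :
    ((setCell g a b 0).getD i []).getD j 0
      = if i = a ∧ j = b then 0 else (g.getD i []).getD j 0 := by
  unfold setCell
  by_cases hia : i = a
  · subst hia
    by_cases hlt : i < g.length
    · rw [getD_set_self _ _ _ _ hlt]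
      by_cases hjb : j = b
      · subst hjb
        by_cases hjl : j < (g.getD i []).length
        · rw [getD_set_self _ _ _ _ hjl]; simp
        · rw [List.set_eq_of_length_le (by omega), getD_of_length_le _ _ _ (by omega)]
          simp
      · rw [getD_set_ne _ _ _ _ _ (fun h => hjb h.symm)]
        simp [hjb]
    · rw [List.set_eq_of_length_le (by omega),
          getD_of_length_le g i [] (by omega)]
      simp
  · rw [getD_set_ne _ _ _ _ _ (fun h => hia h.symm)]
    simp [hia]

lemma clear_length (L : List (Nat × Nat)) (g : List (List Int)) :
    (L.foldl (fun h p => setCell h p.1 p.2 0) g).length = g.length := by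
  induction L generalizing g with
  | nil => rfl
  | cons a t ih => rw [List.foldl_cons, ih, setCell_length]

lemma clear_rowlen (L : List (Nat × Nat)) (g : List (List Int)) (i : Nat) :
    ((L.foldl (fun h p => setCell h p.1 p.2 0) g).getD i []).length = (g.getD i []).length := by
  induction L generalizing g with
  | nil => rfl
  | cons a t ih => rw [List.foldl_cons, ih, setCell_rowlen]

lemma clear_cell (L : List (Nat × Nat)) (g : List (List Int)) (i j : Nat) :
    ((L.foldl (fun h p => setCell h p.1 p.2 0) g).getD i []).getD j 0
      = if (i, j) ∈ L then 0 else (g.getD i []).getD j 0 := by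
  induction L generalizing g with
  | nil => simp
  | cons a t ih =>
    rw [List.foldl_cons, ih, setCell_cell]
    by_cases h1 : (i, j) ∈ t
    · simp [h1]
    · by_cases h2 : (i, j) = a
      · simp [h1, ← h2]
      · have : ¬ (i = a.1 ∧ j = a.2) := by
          intro ⟨x, y⟩; exact h2 (by cases a; simp_all)
        simp [h1, h2, this]

lemma placeGrid_length (grid structure_ : List (List Int)) (row col : Int) :
    (placeGrid grid structure_ row col).length = grid.length := by
  unfold placeGrid
  induction structure_ generalizing grid with
  | nil => rfl
  | cons s t ih => rw [List.foldl_cons, ih, setCell_length]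

lemma placeGrid_rowlen (grid structure_ : List (List Int)) (row col : Int) (i : Nat) :
    ((placeGrid grid structure_ row col).getD i []).length = (grid.getD i []).length := by
  unfold placeGrid
  induction structure_ generalizing grid with
  | nil => rfl
  | cons s t ih => rw [List.foldl_cons, ih, setCell_rowlen]

-- the accumulate-blocks-and-count loop shape shared by A's two scans
lemma foldl_collect {α β : Type} (p : α → Bool) (f : α → List β) (L : List α)
    (acc : List β) (c : Int) :
    L.foldl (fun st x => if p x then (st.1 ++ f x, st.2 + 1) else st) (acc, c)
      = (acc ++ (L.filter p).flatMap f, c + ((L.filter p).length : Int)) := by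
  induction L generalizing acc c with
  | nil => simp
  | cons a t ih =>
    by_cases h : p a
    · simp only [List.foldl_cons, h, if_pos, ih, List.filter_cons_of_pos h]
      simp; omega
    · simp only [List.foldl_cons, h, Bool.false_eq_true, if_false, ih, List.filter_cons_of_neg h]

-- A's column-fullness test over indices equals the row-wise test
lemma all_range_getD (g : List (List Int)) (q : List Int → Bool) :
    (List.range g.length).all (fun i => q (g.getD i [])) = g.all q := by
  rw [Bool.eq_iff_iff]
  simp only [List.all_eq_true, List.mem_range]
  constructor
  · intro h x hx
    obtain ⟨i, hi, rfl⟩ := List.mem_iff_getElem.mp hx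
    have := h i hi; rwa [List.getD_eq_getElem _ _ hi] at this
  · intro h i hi
    rw [List.getD_eq_getElem _ _ hi]; exact h _ (List.getElem_mem hi)

lemma filter_col_eq (g : List (List Int)) (w : Nat) :
    (List.range w).filter (fun j => (List.range g.length).all (fun i => (g.getD i []).getD j 0 == 1))
      = (List.range w).filter (fun j => g.all (fun r => r.getD j 0 == 1)) := by
  apply List.filter_congr; intro j _
  exact all_range_getD g (fun r => r.getD j 0 == 1)

-- ===== B-side evaluation lemmas =====

-- sequential form of the counter updates done by one row
def bump : List Int → Nat → List Int → List Int
  | counts, _, [] => counts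
  | counts, s, t :: r' =>
      bump (if t == 1 then counts.set s (counts.getD s 0 + 1) else counts) (s + 1) r'

lemma bump_length (counts : List Int) (s : Nat) (r : List Int) :
    (bump counts s r).length = counts.length := by
  induction r generalizing counts s with
  | nil => rfl
  | cons t r' ih =>
    simp only [bump]
    rw [ih]
    by_cases h : t == 1 <;> simp [h]

lemma innerB_fold (r : List Int) (s : Nat) (b : Bool) (counts : List Int) :
    (PySem.List.enumerate r (s : Int)).foldl
      (fun st jt =>
        if jt.2 == 1 then (st.1, st.2.set jt.1.toNat (st.2.getD jt.1.toNat 0 + 1))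
        else (false, st.2)) (b, counts)
      = (b && r.all (fun t => t == 1), bump counts s r) := by
  induction r generalizing s b counts with
  | nil => simp [PySem.List.enumerate_nil, bump]
  | cons t r' ih =>
    rw [PySem.List.enumerate_cons, List.foldl_cons]
    have hs1 : (s : Int) + 1 = ((s + 1 : Nat) : Int) := by push_cast; ring
    by_cases h : t == 1
    · simp only [h, if_pos, Int.toNat_natCast, hs1, ih]
      simp only [bump, h, if_pos]
      simp [h]
    · simp only [h, Bool.false_eq_true, if_false, hs1, ih]
      simp only [bump, h, Bool.false_eq_true, if_false]
      simp [h]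

lemma innerB_eq (counts : List Int) (r : List Int) :
    innerB counts r = (r.all (fun t => t == 1), bump counts 0 r) := by
  have := innerB_fold r 0 true counts
  simpa [innerB] using this

lemma bump_getD (r : List Int) (counts : List Int) (s j : Nat) (hj : j < counts.length) :
    (bump counts s r).getD j 0
      = counts.getD j 0
        + (if s ≤ j ∧ j < s + r.length ∧ r.getD (j - s) 0 == 1 then 1 else 0) := by
  induction r generalizing counts s with
  | nil => simp [bump]
  | cons t r' ih =>
    simp only [bump]
    by_cases hjs : j = s
    · subst hjs
      have hni : ¬ (j + 1 ≤ j) := by omega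
      by_cases h : t == 1
      · rw [if_pos h, ih _ _ (by simpa using hj)]
        rw [getD_set_self _ _ _ _ hj]
        have : ¬ (j + 1 ≤ j ∧ j < j + 1 + r'.length ∧ r'.getD (j - (j + 1)) 0 == 1) := by
          intro ⟨h1, _⟩; omega
        have hc : (j ≤ j ∧ j < j + (t :: r').length ∧ (t :: r').getD (j - j) 0 == 1) := by
          refine ⟨le_refl _, Nat.lt_add_of_pos_right (by simp), ?_⟩
          simpa [List.getD] using h
        simp [hc]
        exact beq_iff_eq.mp h
      · rw [if_neg h, ih _ _ hj]
        have h1 : ¬ (j + 1 ≤ j ∧ j < j + 1 + r'.length ∧ r'.getD (j - (j + 1)) 0 == 1) := by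
          intro ⟨h1, _⟩; omega
        have h2 : ¬ (j ≤ j ∧ j < j + (t :: r').length ∧ (t :: r').getD (j - j) 0 == 1) := by
          intro ⟨_, _, h3⟩
          simp [List.getD] at h3
          exact absurd (by simpa using h3) (by simpa using h)
        simp
        simpa using h
    · have hset : ∀ v : Int, (counts.set s v).getD j 0 = counts.getD j 0 := fun v =>
        getD_set_ne _ _ _ _ _ (fun h => hjs h.symm)
      have hlen : ∀ v : Int, j < (counts.set s v).length := fun v => by simpa using hj
      have hiff : (s + 1 ≤ j ∧ j < s + 1 + r'.length ∧ r'.getD (j - (s + 1)) 0 == 1)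
          ↔ (s ≤ j ∧ j < s + (t :: r').length ∧ (t :: r').getD (j - s) 0 == 1) := by
        constructor
        · intro ⟨h1, h2, h3⟩
          refine ⟨by omega, by simp; omega, ?_⟩
          have : j - s = (j - (s + 1)) + 1 := by omega
          rw [this]
          simpa [List.getD] using h3
        · intro ⟨h1, h2, h3⟩
          have hs1 : s + 1 ≤ j := by omega
          refine ⟨hs1, by simp at h2 ⊢; omega, ?_⟩
          have : j - s = (j - (s + 1)) + 1 := by omega
          rw [this] at h3
          simpa [List.getD] using h3
      by_cases h : t == 1
      · rw [if_pos h, ih _ _ (hlen _), hset]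
        congr 1
        simp only [hiff]
      · rw [if_neg h, ih _ _ hj]
        congr 1
        simp only [hiff]

-- the outer single pass, evaluated
lemma stepB_eq (acc : List Bool) (counts : List Int) (r : List Int) :
    stepB (acc, counts) r = (acc ++ [r.all (fun t => t == 1)], bump counts 0 r) := by
  simp [stepB, innerB_eq]

lemma outerB_eq (g : List (List Int)) (acc : List Bool) (counts : List Int) :
    g.foldl stepB (acc, counts)
      = (acc ++ g.map (fun r => r.all (fun t => t == 1)),
         g.foldl (fun c r => bump c 0 r) counts) := by
  induction g generalizing acc counts with
  | nil => simp
  | cons r t ih =>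
    rw [List.foldl_cons, stepB_eq, ih]
    simp

lemma countsFold_length (g : List (List Int)) (counts : List Int) :
    (g.foldl (fun c r => bump c 0 r) counts).length = counts.length := by
  induction g generalizing counts with
  | nil => rfl
  | cons r t ih => rw [List.foldl_cons, ih, bump_length]

lemma countsFold_getD (g : List (List Int)) (w : Nat) (counts : List Int)
    (hlen : counts.length = w) (hrows : ∀ r ∈ g, r.length = w) (j : Nat) (hj : j < w) :
    (g.foldl (fun c r => bump c 0 r) counts).getD j 0
      = counts.getD j 0 + (g.countP (fun r => r.getD j 0 == 1) : Int) := by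
  induction g generalizing counts with
  | nil => simp
  | cons r t ih =>
    rw [List.foldl_cons, ih _ (by rw [bump_length]; exact hlen)
          (fun r hr => hrows r (List.mem_cons_of_mem _ hr))]
    rw [bump_getD _ _ _ _ (by omega)]
    have hr : r.length = w := hrows r List.mem_cons_self
    rw [List.countP_cons]
    by_cases h : r.getD j 0 == 1
    · have hcnd : (0 ≤ j ∧ j < 0 + r.length ∧ r.getD (j - 0) 0 == 1) := ⟨Nat.zero_le _, by omega, by simpa using h⟩
      rw [if_pos hcnd, if_pos h]
      push_cast; ring
    · have hcnd : ¬ (0 ≤ j ∧ j < 0 + r.length ∧ r.getD (j - 0) 0 == 1) := by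
        intro ⟨_, _, h3⟩; exact h (by simpa using h3)
      rw [if_neg hcnd, if_neg h]
      push_cast; ring

-- countP as the length of a filtered index range
lemma countP_eq_filter_range {α : Type} (l : List α) (d : α) (f : α → Bool) :
    ((List.range l.length).filter (fun i => f (l.getD i d))).length = l.countP f := by
  induction l using List.reverseRecOn with
  | nil => simp
  | append_singleton l a ih =>
    rw [List.length_append, List.length_singleton, List.range_succ, List.filter_append,
        List.length_append, List.countP_append]
    have h1 : (List.range l.length).filter (fun i => f ((l ++ [a]).getD i d))
        = (List.range l.length).filter (fun i => f (l.getD i d)) := by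
      apply List.filter_congr; intro i hi
      have hi' : i < l.length := List.mem_range.mp hi
      congr 1
      rw [List.getD_eq_getElem _ _ (by simp; omega), List.getD_eq_getElem _ _ hi',
          List.getElem_append_left hi']
    have h2 : (l ++ [a]).getD l.length d = a := by
      rw [List.getD_eq_getElem _ _ (by simp), List.getElem_append_right (le_refl _)]
      simp
    rw [h1, ih, List.filter_singleton, h2]
    by_cases h : f a <;> simp [h]

-- ===== the main proof =====
theorem smash_example_grid_spec : Claim_equal_smash_example_grid := by
  intro grid structure_ row col _ hpre
  obtain ⟨hne, hrect, hw0, -⟩ := hpre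
  unfold Spec_smash_example_grid smash_example_grid smash_example_grid_alt
  simp only [foldl_collect, filter_col_eq, List.nil_append, zero_add, outerB_eq]
  set g := placeGrid grid structure_ row col with hg
  have hlen : g.length = grid.length := placeGrid_length grid structure_ row col
  have hn : g.length ≠ 0 := by
    rw [hlen]; simpa [List.length_eq_zero_iff] using hne
  have hwdef : (g.getD 0 []).length = (grid.headD []).length := by
    rw [hg, placeGrid_rowlen, getD_zero_eq_headD]
  have hw : (g.getD 0 []).length ≠ 0 := by rw [hwdef]; exact hw0
  have hrowD : ∀ i, i < g.length → (g.getD i []).length = (g.getD 0 []).length := by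
    intro i hi
    rw [hg, placeGrid_rowlen, hwdef, List.getD_eq_getElem grid [] (by omega : i < grid.length)]
    exact hrect _ (List.getElem_mem _)
  have hrowsMem : ∀ r ∈ g, r.length = (g.getD 0 []).length := by
    intro r hr
    obtain ⟨i, hi, rfl⟩ := List.mem_iff_getElem.mp hr
    rw [← List.getD_eq_getElem g [] hi]
    exact hrowD i hi
  clear hg hlen hne hrect hw0 hwdef
  set n := g.length with hndef
  set w := (g.getD 0 []).length with hwdef2
  set FR := (List.range n).filter (fun i => (g.getD i []).all fun t => t == 1) with hFR
  set FC := (List.range w).filter (fun j => g.all fun r => r.getD j 0 == 1) with hFC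
  set Sm := FR.flatMap (fun x => (List.range ((g.getD x []).length)).map fun j => (x, j)) ++
      FC.flatMap (fun x => (List.range n).map fun i => (i, x)) with hSm
  set counts := g.foldl (fun c r => bump c 0 r) (List.replicate w 0) with hcounts
  have hclen : counts.length = w := by rw [hcounts, countsFold_length]; simp
  have hcget : ∀ j, j < w →
      counts.getD j 0 = (g.countP (fun r => r.getD j 0 == 1) : Int) := by
    intro j hj
    rw [hcounts, countsFold_getD g w _ (by simp) hrowsMem j hj]
    simp
  have hcolflag : ∀ j, j < w →
      ((counts.getD j 0 == (n : Int)) = g.all (fun r => r.getD j 0 == 1)) := by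
    intro j hj
    rw [hcget j hj, Bool.eq_iff_iff, beq_iff_eq, Nat.cast_inj, hndef,
        List.countP_eq_length, List.all_eq_true]
  have hFRmem : ∀ i ∈ FR, i < n := by
    intro i hi; rw [hFR] at hi
    exact List.mem_range.mp (List.mem_filter.mp hi).1
  have hFRiff : ∀ i, i < n → (i ∈ FR ↔ (g.getD i []).all (fun t => t == 1)) := by
    intro i hi
    rw [hFR, List.mem_filter, List.mem_range]
    constructor
    · intro ⟨_, h⟩; exact h
    · intro h; exact ⟨hi, h⟩
  have hFCiff : ∀ j, j < w → (j ∈ FC ↔ g.all (fun r => r.getD j 0 == 1)) := by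
    intro j hj
    rw [hFC, List.mem_filter, List.mem_range]
    constructor
    · intro ⟨_, h⟩; exact h
    · intro h; exact ⟨hj, h⟩
  have hmem : ∀ i j : Nat, ((i, j) ∈ Sm) ↔
      ((i ∈ FR ∧ j < (g.getD i []).length) ∨ (j ∈ FC ∧ i < n)) := by
    intro i j
    rw [hSm]
    simp only [List.mem_append, List.mem_flatMap, List.mem_map, List.mem_range, Prod.mk.injEq]
    constructor
    · rintro (⟨x, hx, j', hj', rfl, rfl⟩ | ⟨x, hx, i', hi', rfl, rfl⟩)
      · exact Or.inl ⟨hx, hj'⟩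
      · exact Or.inr ⟨hx, hi'⟩
    · rintro (⟨hx, hj⟩ | ⟨hx, hi⟩)
      · exact Or.inl ⟨i, hx, j, hj, rfl, rfl⟩
      · exact Or.inr ⟨j, hx, i, hi, rfl, rfl⟩
  have hSmNil : (Sm = []) ↔ (FR = [] ∧ FC = []) := by
    rw [hSm]
    simp only [List.append_eq_nil_iff, List.flatMap_eq_nil_iff, List.map_eq_nil_iff,
      List.range_eq_nil]
    constructor
    · rintro ⟨h1, h2⟩
      constructor
      · by_contra hne'
        obtain ⟨a, ha⟩ := List.exists_mem_of_ne_nil FR hne'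
        have := h1 a ha
        have := hrowD a (hFRmem a ha)
        omega
      · by_contra hne'
        obtain ⟨a, ha⟩ := List.exists_mem_of_ne_nil FC hne'
        have := h2 a ha
        omega
    · rintro ⟨hA, hB⟩; simp [hA, hB]
  -- B's group counts equal the filter lengths
  have hRFcount : (g.map (fun r => r.all (fun t => t == 1))).countP id = FR.length := by
    have hm : (g.map (fun r => r.all (fun t => t == 1))).countP id
        = g.countP (fun r => r.all (fun t => t == 1)) := by
      simp [List.countP_map]
    rw [hm, hFR, ← countP_eq_filter_range g [] (fun r => r.all (fun t => t == 1)), ← hndef]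
  have hFCcount : ((counts.map (fun c => c == (n : Int))).countP id) = FC.length := by
    have hm : (counts.map (fun c => c == (n : Int))).countP id
        = counts.countP (fun c => c == (n : Int)) := by
      simp [List.countP_map]
    rw [hm, hFC, ← countP_eq_filter_range counts 0 (fun c => c == (n : Int)), hclen]
    congr 1
    apply List.filter_congr; intro j hj
    have hjw : j < w := List.mem_range.mp hj
    simpa using (hcolflag j hjw)
  rw [Prod.mk.injEq]
  constructor
  · -- the cleared grids agree
    apply List.ext_getElem
    · simp [clear_length, hndef, hclen]
    · intro i hi1 hi2
      have hi : i < n := by rw [clear_length] at hi1; exact hi1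
      have hglen : i < g.length := by omega
      have hgi : g[i]'hglen = g.getD i [] := (List.getD_eq_getElem g [] hglen).symm
      rw [List.getElem_map, List.getElem_zip]
      rw [← List.getD_eq_getElem _ [] hi1]
      apply List.ext_getElem
      · rw [clear_rowlen, hrowD i hi]
        simp only [List.getElem_map, List.getElem_zip, hgi]
        by_cases hfull : (g.getD i []).all (fun t => t == 1)
        · rw [if_pos hfull]; simp
        · rw [if_neg hfull]
          simp only [List.length_map, List.length_zip, hclen]
          have hrl := hrowD i hi
          omega
      · intro j hj1 hj2
        have hjlen : j < (g.getD i []).length := by rw [clear_rowlen] at hj1; exact hj1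
        have hjw : j < w := by rw [← hrowD i hi]; exact hjlen
        rw [← List.getD_eq_getElem _ 0 hj1, ← List.getD_eq_getElem _ 0 hj2, clear_cell]
        simp only [List.getElem_map, List.getElem_zip, hgi,
          apply_ite (fun l : List Int => l.getD j 0)]
        by_cases hfull : (g.getD i []).all (fun t => t == 1)
        · have hiFR : i ∈ FR := (hFRiff i hi).mpr hfull
          have hin : (i, j) ∈ Sm := (hmem i j).mpr (Or.inl ⟨hiFR, hjlen⟩)
          rw [if_pos hin, if_pos hfull,
            List.getD_eq_getElem _ 0 (by simpa using hjw), List.getElem_replicate]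
        · have hiFR : i ∉ FR := fun h => hfull ((hFRiff i hi).mp h)
          rw [if_neg hfull,
            List.getD_eq_getElem _ 0 (by simp only [List.length_map, List.length_zip, hclen]; omega :
              j < (((counts.map (fun c => c == (n : Int))).zip (g.getD i [])).map
                (fun q => if q.1 then (0 : Int) else q.2)).length)]
          simp only [List.getElem_map, List.getElem_zip]
          have hcg : counts.getD j 0 = counts[j]'(by omega) :=
            List.getD_eq_getElem counts 0 (by omega)
          simp only [← hcg, hcolflag j hjw]
          by_cases hjFC : j ∈ FC
          · have hin : (i, j) ∈ Sm := (hmem i j).mpr (Or.inr ⟨hjFC, hi⟩)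
            rw [if_pos hin, if_pos ((hFCiff j hjw).mp hjFC)]
          · have hout : (i, j) ∉ Sm := by
              rw [hmem i j]; push_neg
              exact ⟨fun h => absurd h hiFR, fun h => absurd h hjFC⟩
            have hfc : ¬ ((g.all fun r => r.getD j 0 == 1) = true) :=
              fun h => hjFC ((hFCiff j hjw).mpr h)
            rw [if_neg hout, if_neg hfc, List.getD_eq_getElem _ 0 hjlen]
  · -- the scores agree
    rw [hRFcount, hFCcount]
    by_cases hE : FR = [] ∧ FC = []
    · have h1 : Sm = [] := hSmNil.mpr hE
      simp [h1, hE.1, hE.2]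
    · have h1 : Sm ≠ [] := fun h => hE (hSmNil.mp h)
      have h2 : ((FR.length : Int) + (FC.length : Int)) ≠ 0 := by
        rcases (not_and_or.mp hE) with h | h
        · have hpos : 0 < FR.length := Nat.pos_of_ne_zero (fun hc => h (List.length_eq_zero_iff.mp hc))
          positivity
        · have hpos : 0 < FC.length := Nat.pos_of_ne_zero (fun hc => h (List.length_eq_zero_iff.mp hc))
          positivity
      simp only [h1, h2, if_pos, ne_eq, not_false_iff]
      ring
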